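-- pv_equiv track=rewrite | github.com/Jutulli/SF-2 | Assignment2/Part2.py | getMovementString
-- ===== SOURCE A (Python) =====
-- movementDirections = {
--     "W": (-1,0),
--     "S": (1,0),
--     "A": (0, -1),
--     "D": (0,1)}
--
-- def getMovementString(available_moves):
--     middle_string = "Enter WASD (or QUIT):"
--     top_string = (" " * len(middle_string)) + "\t\tW\n"
--     bottom_string = "\tA\tS\tD "
--
--     for key in movementDirections.keys():
--         if not key in available_moves:
--             top_string = top_string.replace(key, "()")
--             bottom_string = bottom_string.replace(key, "()")
--
--     return top_string + middle_string + bottom_string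
-- ===== SOURCE B (Python) =====
-- def getMovementString(available_moves):
--     def show(k):
--         return k if k in available_moves else "()"
--     middle = "Enter WASD (or QUIT):"
--     return (" " * len(middle) + "\t\t" + show("W") + "\n"
--             + middle
--             + "\t" + show("A") + "\t" + show("S") + "\t" + show("D") + " ")
-- ===== Notes on version B (the rewrite author's own statement) =====
-- stated objective: simpler
-- what changed: B drops A's loop over the direction dict and the string-mutating .replace passes; each displayed key token is decided up front with a show(k) conditional and the prompt is assembled once by concatenation.
import Mathlib
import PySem

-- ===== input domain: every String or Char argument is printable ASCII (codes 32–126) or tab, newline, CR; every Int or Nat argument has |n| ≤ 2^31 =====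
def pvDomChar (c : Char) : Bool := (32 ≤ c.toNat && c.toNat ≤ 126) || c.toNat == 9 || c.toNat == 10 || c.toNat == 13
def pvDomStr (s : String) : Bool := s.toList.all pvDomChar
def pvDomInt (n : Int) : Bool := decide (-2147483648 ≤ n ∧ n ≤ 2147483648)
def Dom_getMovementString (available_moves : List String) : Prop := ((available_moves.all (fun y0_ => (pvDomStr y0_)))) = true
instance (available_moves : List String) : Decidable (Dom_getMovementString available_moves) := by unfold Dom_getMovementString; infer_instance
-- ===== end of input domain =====

-- B decides each displayed WASD token with a conditional instead of A's loop of .replace passes; objective: simpler.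


-- ===== PORT A =====
-- movementDirections.keys() in insertion order
def movementKeys : List String := ["W", "S", "A", "D"]

def getMovementString (available_moves : List String) : String :=
  let middle_string : String := "Enter WASD (or QUIT):"
  -- " " * len(middle_string): ported by hand as replicate (exact for a nonnegative count)
  let top_string : String := String.ofList (List.replicate (PySem.Str.len middle_string).toNat ' ') ++ "\t\tW\n"
  let bottom_string : String := "\tA\tS\tD "
  let (top_string, bottom_string) :=
    movementKeys.foldl
      (fun (st : String × String) key =>
        if !(available_moves.contains key) then
          (PySem.Str.replace st.1 key "()", PySem.Str.replace st.2 key "()")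
        else st)
      (top_string, bottom_string)
  top_string ++ middle_string ++ bottom_string

-- ===== PORT B =====
def showKey (available_moves : List String) (k : String) : String :=
  if available_moves.contains k then k else "()"

def getMovementString_alt (available_moves : List String) : String :=
  let middle : String := "Enter WASD (or QUIT):"
  String.ofList (List.replicate (PySem.Str.len middle).toNat ' ') ++ "\t\t" ++ showKey available_moves "W" ++ "\n"
    ++ middle
    ++ "\t" ++ showKey available_moves "A" ++ "\t" ++ showKey available_moves "S" ++ "\t" ++ showKey available_moves "D" ++ " "

-- ===== PRECONDITION & SPEC =====
def Spec_getMovementString (available_moves : List String) (out : String) : Prop := out = getMovementString_alt available_moves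
instance (available_moves : List String) (out : String) : Decidable (Spec_getMovementString available_moves out) := by unfold Spec_getMovementString; infer_instance

-- ===== CLAIM (what is proved, stated in full; the proofs are below) =====
def Claim_equal_getMovementString : Prop := ∀ (available_moves : List String), Dom_getMovementString available_moves → Spec_getMovementString available_moves (getMovementString available_moves)

-- ===== LEMMAS AND PROOFS =====

-- ===== VERDICT (by name: the statement is the Claim_ definition above) =====
theorem getMovementString_spec : Claim_equal_getMovementString := by
  intro am _
  unfold Spec_getMovementString getMovementString getMovementString_alt showKey movementKeys
  by_cases hW : ("W" ∈ am) <;> by_cases hA : ("A" ∈ am) <;>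
    by_cases hS : ("S" ∈ am) <;> by_cases hD : ("D" ∈ am) <;>
      simp [hW, hA, hS, hD] <;> decide
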